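-- pv_equiv track=rewrite | github.com/SSteve/AdventOfCode | Advent2023/day13.py | horizontal_reflection_value
-- ===== SOURCE A (Python) =====
-- def horizontal_reflection_value(pattern: list[str], x: int, required_mismatches=0) -> int | None:
--     # Determine if there is a reflection at x. If so, return the reflection value (the
--     # number of columns to the left of the line of reflection).
--     # x is the dividing line where we split each line. The left part is characters 0 to x-1. The
--     # right part is x to len(pattern[0]) - 1. Excess columns in the larger partition are ignored.
--
--     # For the number of columns, use the smaller number of columns to the left or right of the dividing line.
--     number_of_columns = min(x, len(pattern[0]) - x)
--     number_of_mismatches = 0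
--     for y in range(len(pattern)):
--         left_index = x - 1
--         right_index = x
--         for _ in range(number_of_columns):
--             if pattern[y][left_index] != pattern[y][right_index]:
--                 number_of_mismatches += 1
--                 if number_of_mismatches > required_mismatches:
--                     return None
--             left_index -= 1
--             right_index += 1
--
--     # If we get here, we didn't have too many mismatches.
--     return x if number_of_mismatches == required_mismatches else None
-- ===== SOURCE B (Python) =====
-- def horizontal_reflection_value(pattern: list[str], x: int, required_mismatches=0) -> int | None:
--     # Build the mirror image once: the left half of every row (reversed) and the
--     # right half of every row, joined into two strings; the reflection is valid
--     # iff their Hamming distance equals required_mismatches.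
--     n = min(x, len(pattern[0]) - x)
--     left = "".join(row[x - n:x][::-1] for row in pattern)
--     right = "".join(row[x:x + n] for row in pattern)
--     mismatches = sum(a != b for a, b in zip(left, right))
--     return x if mismatches == required_mismatches else None
-- ===== Notes on version B (the rewrite author's own statement) =====
-- stated objective: alternative
-- what changed: B does no index walking at all: it slices the left half of each row and reverses it, joins all left halves and all right halves into two strings, and decides by one Hamming-distance comparison of those two strings, instead of A's nested row-major loop with left/right index pointers and an early return once the mismatch count exceeds the limit.
-- outside the precondition, e.g. on horizontal_reflection_value(['ab', 'x'], 1, 0): A returns None, B returns None; on horizontal_reflection_value([], 0, 0): A raises IndexError, B raises IndexError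
import Mathlib
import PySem

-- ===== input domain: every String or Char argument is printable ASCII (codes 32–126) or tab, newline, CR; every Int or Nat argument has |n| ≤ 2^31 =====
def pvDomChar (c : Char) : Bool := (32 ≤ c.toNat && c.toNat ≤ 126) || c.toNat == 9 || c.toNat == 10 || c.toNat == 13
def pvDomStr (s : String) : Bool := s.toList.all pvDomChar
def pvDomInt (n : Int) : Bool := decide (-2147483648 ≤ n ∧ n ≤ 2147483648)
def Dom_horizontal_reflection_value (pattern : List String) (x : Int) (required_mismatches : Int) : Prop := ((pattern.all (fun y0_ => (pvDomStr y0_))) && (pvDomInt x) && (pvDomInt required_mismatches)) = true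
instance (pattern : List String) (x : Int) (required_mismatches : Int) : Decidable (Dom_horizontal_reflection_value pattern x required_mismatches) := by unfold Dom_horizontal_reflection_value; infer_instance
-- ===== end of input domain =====

-- B replaces A's index-pointer walk by slicing: it reverses the left half of each
-- row, joins all left and all right halves into two character sequences and decides
-- by a single Hamming-distance comparison; objective: alternative algorithm, same result.

-- ===== PORT A =====
-- char access pattern[y][i]; within Pre_ the index is always in range (Python raises otherwise)
def pvAAt (row : List Char) (i : Int) : Char := (PySem.List.pyGet? row i).getD ' '

-- inner 'for _ in range(number_of_columns)' loop of A, with its early 'return None'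
def pvAInner (row : List Char) (req : Int) : Nat → Int → Int → Int → Option Int
  | 0, _, _, count => some count
  | n + 1, left, right, count =>
    if pvAAt row left ≠ pvAAt row right then
      if count + 1 > req then none
      else pvAInner row req n (left - 1) (right + 1) (count + 1)
    else pvAInner row req n (left - 1) (right + 1) count

-- outer 'for y in range(len(pattern))' loop of A
def pvARows (req x : Int) (noc : Nat) : List String → Int → Option Int
  | [], count => some count
  | row :: rest, count =>
    match pvAInner row.toList req noc (x - 1) x count with
    | none => none
    | some c => pvARows req x noc rest c

def horizontal_reflection_value (pattern : List String) (x : Int) (required_mismatches : Int) : Option Int :=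
  let number_of_columns : Int := min x (PySem.Str.len ((PySem.List.pyGet? pattern 0).getD "") - x)
  match pvARows required_mismatches x number_of_columns.toNat pattern 0 with
  | none => none
  | some c => if c = required_mismatches then some x else none

-- ===== PORT B =====
def horizontal_reflection_value_alt (pattern : List String) (x : Int) (required_mismatches : Int) : Option Int :=
  let n : Int := min x (PySem.Str.len ((PySem.List.pyGet? pattern 0).getD "") - x)
  -- left = "".join(row[x-n:x][::-1] for row in pattern)
  let left : List Char := (pattern.map (fun row => (PySem.List.slice row.toList (some (x - n)) (some x)).reverse)).flatten
  -- right = "".join(row[x:x+n] for row in pattern)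
  let right : List Char := (pattern.map (fun row => PySem.List.slice row.toList (some x) (some (x + n)))).flatten
  -- mismatches = sum(a != b for a, b in zip(left, right))
  let mismatches : Int := (left.zip right).foldl (fun acc p => acc + (if p.1 ≠ p.2 then (1 : Int) else 0)) 0
  if mismatches = required_mismatches then some x else none

-- ===== PRECONDITION & SPEC =====
-- Pre_ excludes exactly the inputs around out-of-range indexing: the empty pattern
-- (pattern[0] raises in both programs) and ragged patterns where some row is too short
-- for the mirrored window (A raises IndexError there unless an early return fires first,
-- while B's slices silently truncate).
def Pre_horizontal_reflection_value (pattern : List String) (x : Int) (required_mismatches : Int) : Prop :=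
  (!pattern.isEmpty &&
    pattern.all (fun row =>
      decide (min x (PySem.Str.len (pattern.headD "") - x) ≤ 0) ||
      decide (x + min x (PySem.Str.len (pattern.headD "") - x) ≤ PySem.Str.len row))) = true
instance (pattern : List String) (x : Int) (required_mismatches : Int) : Decidable (Pre_horizontal_reflection_value pattern x required_mismatches) := by unfold Pre_horizontal_reflection_value; infer_instance

def pvWitness_horizontal_reflection_value : List String × Int × Int := (["ab", "ba"], 1, 2)

def Spec_horizontal_reflection_value (pattern : List String) (x : Int) (required_mismatches : Int) (out : Option Int) : Prop := out = horizontal_reflection_value_alt pattern x required_mismatches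
instance (pattern : List String) (x : Int) (required_mismatches : Int) (out : Option Int) : Decidable (Spec_horizontal_reflection_value pattern x required_mismatches out) := by unfold Spec_horizontal_reflection_value; infer_instance

-- ===== CLAIM =====
def Claim_equal_horizontal_reflection_value : Prop := ∀ (pattern : List String) (x : Int) (required_mismatches : Int), Dom_horizontal_reflection_value pattern x required_mismatches → Pre_horizontal_reflection_value pattern x required_mismatches → Spec_horizontal_reflection_value pattern x required_mismatches (horizontal_reflection_value pattern x required_mismatches)

-- ===== LEMMAS AND PROOFS =====

-- single-cell mismatch indicator
def pvF (row : List Char) (l r : Int) : Int := if pvAAt row l ≠ pvAAt row r then 1 else 0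

-- pure mismatch count of A's inner loop (no early exit)
def pvCnt (row : List Char) : Int → Int → Nat → Int
  | _, _, 0 => 0
  | l, r, n + 1 => pvF row l r + pvCnt row (l - 1) (r + 1) n

theorem pvF_nonneg (row : List Char) (l r : Int) : 0 ≤ pvF row l r := by
  unfold pvF; split_ifs <;> omega

theorem pvCnt_nonneg (row : List Char) : ∀ (l r : Int) (n : Nat), 0 ≤ pvCnt row l r n := by
  intro l r n
  induction n generalizing l r with
  | zero => simp [pvCnt]
  | succ n ih => have := pvF_nonneg row l r; have := ih (l - 1) (r + 1); simp only [pvCnt]; omega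

theorem pvAInner_eq (row : List Char) (req : Int) :
    ∀ (n : Nat) (l r count : Int),
      pvAInner row req n l r count =
        if count + pvCnt row l r n > req ∧ 0 < pvCnt row l r n then none
        else some (count + pvCnt row l r n) := by
  intro n
  induction n with
  | zero => intro l r count; simp [pvAInner, pvCnt]
  | succ n ih =>
    intro l r count
    have hrest := pvCnt_nonneg row (l - 1) (r + 1) n
    simp only [pvAInner, pvCnt]
    by_cases h : pvAAt row l ≠ pvAAt row r
    · simp only [if_pos h]
      have hf : pvF row l r = 1 := by simp only [pvF, if_pos h]
      rw [hf]
      by_cases hc : count + 1 > req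
      · rw [if_pos hc, if_pos (by constructor <;> omega)]
      · rw [if_neg hc, ih]
        split_ifs <;> first | rfl | (exfalso; omega) | (congr 1; omega)
    · simp only [if_neg h]
      have hf : pvF row l r = 0 := by simp only [pvF, if_neg h]
      rw [hf, ih]
      split_ifs <;> first | rfl | (exfalso; omega) | (congr 1; omega)

-- total mismatch count across rows
def pvRowsCnt (x : Int) (noc : Nat) (rows : List String) : Int :=
  (rows.map (fun row => pvCnt row.toList (x - 1) x noc)).sum

theorem pvRowsCnt_nonneg (x : Int) (noc : Nat) (rows : List String) : 0 ≤ pvRowsCnt x noc rows := by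
  induction rows with
  | nil => simp [pvRowsCnt]
  | cons row rest ih =>
    have := pvCnt_nonneg row.toList (x - 1) x noc
    simp only [pvRowsCnt, List.map_cons, List.sum_cons] at *
    omega

theorem pvARows_eq (req x : Int) (noc : Nat) :
    ∀ (rows : List String) (count : Int),
      pvARows req x noc rows count =
        if count + pvRowsCnt x noc rows > req ∧ 0 < pvRowsCnt x noc rows then none
        else some (count + pvRowsCnt x noc rows) := by
  intro rows
  induction rows with
  | nil => intro count; simp [pvARows, pvRowsCnt]
  | cons row rest ih =>
    intro count
    have hc1 := pvCnt_nonneg row.toList (x - 1) x noc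
    have hS := pvRowsCnt_nonneg x noc rest
    simp only [pvARows, pvAInner_eq]
    have hexp : pvRowsCnt x noc (row :: rest) = pvCnt row.toList (x - 1) x noc + pvRowsCnt x noc rest := by
      simp [pvRowsCnt]
    rw [hexp]
    by_cases h : count + pvCnt row.toList (x - 1) x noc > req ∧ 0 < pvCnt row.toList (x - 1) x noc
    · rw [if_pos h, if_pos (by omega)]
    · rw [if_neg h]
      simp only [ih]
      split_ifs <;> first | rfl | (exfalso; omega) | (congr 1; omega)

-- A's inner count as a sum over column offsets
theorem pvCnt_eq_sum (row : List Char) :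
    ∀ (n : Nat) (l r : Int),
      pvCnt row l r n = ((List.range n).map (fun (i : Nat) => pvF row (l - (i : Int)) (r + (i : Int)))).sum := by
  intro n
  induction n with
  | zero => intro l r; simp [pvCnt]
  | succ n ih =>
    intro l r
    rw [List.range_succ_eq_map, List.map_cons, List.sum_cons, List.map_map]
    simp only [Nat.cast_zero, sub_zero, add_zero, pvCnt]
    rw [ih (l - 1) (r + 1)]
    congr 1
    apply congrArg
    apply List.map_congr_left
    intro i _
    simp only [Function.comp_apply, Nat.cast_succ]
    rw [show l - 1 - (i : Int) = l - ((i : Int) + 1) by ring,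
        show r + 1 + (i : Int) = r + ((i : Int) + 1) by ring]

-- generic foldl-add = initial value plus sum over a map
theorem pvFoldlAdd {α : Type} (h : α → Int) (l : List α) :
    ∀ c : Int, l.foldl (fun acc a => acc + h a) c = c + (l.map h).sum := by
  induction l with
  | nil => intro c; simp
  | cons a t ih => intro c; simp only [List.foldl_cons, List.map_cons, List.sum_cons]; rw [ih]; ring

-- Hamming distance of two character sequences (B's zip-count)
def pvHam (A B : List Char) : Int :=
  ((A.zip B).map (fun p => if p.1 ≠ p.2 then (1 : Int) else 0)).sum

theorem pvHam_append (a b c d : List Char) (h : a.length = b.length) :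
    pvHam (a ++ c) (b ++ d) = pvHam a b + pvHam c d := by
  unfold pvHam
  rw [List.zip_append h, List.map_append, List.sum_append]

-- positional form of pvHam for equal-length lists
theorem pvHam_eq_sum (k : Nat) :
    ∀ (A B : List Char), A.length = k → B.length = k →
      pvHam A B = ((List.range k).map (fun i => if A.getD i ' ' ≠ B.getD i ' ' then (1 : Int) else 0)).sum := by
  induction k with
  | zero =>
    intro A B hA hB
    rw [List.eq_nil_of_length_eq_zero hA, List.eq_nil_of_length_eq_zero hB]
    simp [pvHam]
  | succ k ih =>
    intro A B hA hB
    match A, B with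
    | a :: A', b :: B' =>
      simp only [List.length_cons, Nat.succ.injEq] at hA hB
      rw [List.range_succ_eq_map, List.map_cons, List.sum_cons, List.map_map]
      have : pvHam (a :: A') (b :: B') = (if a ≠ b then (1 : Int) else 0) + pvHam A' B' := by
        simp [pvHam]
      rw [this, ih A' B' hA hB]
      simp only [Function.comp_def, List.getD_cons_zero, List.getD_cons_succ]

-- Pre_ unfolded to its propositional reading
theorem pvPre_iff (pattern : List String) (x req : Int) :
    Pre_horizontal_reflection_value pattern x req ↔
      (pattern ≠ [] ∧ ∀ row ∈ pattern,
        min x (PySem.Str.len (pattern.headD "") - x) ≤ 0 ∨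
        x + min x (PySem.Str.len (pattern.headD "") - x) ≤ PySem.Str.len row) := by
  unfold Pre_horizontal_reflection_value
  simp [Bool.and_eq_true, List.all_eq_true, Bool.or_eq_true, decide_eq_true_eq,
        List.isEmpty_eq_false_iff]

-- an empty Python slice: xs[a:b] with b <= a, provided the bounds do not mix a negative
-- start with a nonnegative stop
theorem pvSliceEmpty (row : List Char) (a b : Int) (hba : b ≤ a) (h : 0 ≤ b ∨ a < 0 ∨ b = a) :
    PySem.List.slice row (some a) (some b) = [] := by
  apply List.eq_nil_of_length_eq_zero
  rw [PySem.List.length_slice]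
  have hmono : PySem.List.clampIdx row.length b ≤ PySem.List.clampIdx row.length a := by
    simp only [PySem.List.clampIdx]; split_ifs <;> omega
  omega

-- one row: Hamming distance of (reversed left window, right window) = A's pointer count
theorem pvRow (row : List Char) (p k : Nat) (h : p + k + k ≤ row.length) :
    pvHam (((row.drop p).take k).reverse) ((row.drop (p + k)).take k)
      = pvCnt row (((p + k : Nat) : Int) - 1) ((p + k : Nat) : Int) k := by
  have hlenL : (((row.drop p).take k).reverse).length = k := by
    simp [List.length_take, List.length_drop]; omega
  have hlenR : ((row.drop (p + k)).take k).length = k := by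
    simp [List.length_take, List.length_drop]; omega
  rw [pvHam_eq_sum k _ _ hlenL hlenR, pvCnt_eq_sum]
  apply congrArg
  apply List.map_congr_left
  intro i hi
  rw [List.mem_range] at hi
  have hL : (((row.drop p).take k).reverse).getD i ' ' = pvAAt row ((((p + k : Nat) : Int) - 1) - (i : Int)) := by
    rw [List.getD_eq_getElem _ _ (by omega : i < (((row.drop p).take k).reverse).length),
        List.getElem_reverse, List.getElem_take, List.getElem_drop]
    rw [pvAAt, PySem.List.pyGet?_eq_some_getElem row (by push_cast; omega) (by push_cast; omega), Option.getD_some]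
    have hidx : p + ((row.drop p).take k).length - 1 - i = ((((p + k : Nat) : Int) - 1) - (i : Int)).toNat := by
      simp [List.length_take, List.length_drop]; omega
    simp [hidx]
    congr 1
    omega
  have hR : ((row.drop (p + k)).take k).getD i ' ' = pvAAt row (((p + k : Nat) : Int) + (i : Int)) := by
    rw [List.getD_eq_getElem _ _ (by omega : i < ((row.drop (p + k)).take k).length),
        List.getElem_take, List.getElem_drop]
    rw [pvAAt, PySem.List.pyGet?_eq_some_getElem row (by push_cast; omega) (by push_cast; omega), Option.getD_some]
    have hidx : p + k + i = ((((p + k : Nat) : Int)) + (i : Int)).toNat := by omega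
    simp [hidx]
  rw [hL, hR, pvF]

-- the joined strings: total Hamming distance = A's total pointer count
theorem pvJoin (x n : Int) (hn : 0 < n) (hxn : 0 ≤ x - n) :
    ∀ rows : List String, (∀ row ∈ rows, x + n ≤ (row.toList.length : Int)) →
      pvHam ((rows.map (fun row => (PySem.List.slice row.toList (some (x - n)) (some x)).reverse)).flatten)
            ((rows.map (fun row => PySem.List.slice row.toList (some x) (some (x + n)))).flatten)
        = pvRowsCnt x n.toNat rows := by
  intro rows
  induction rows with
  | nil => intro _; simp [pvHam, pvRowsCnt]
  | cons row rest ih =>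
    intro hrows
    have hrow := hrows row (List.mem_cons_self)
    have hrow' : x + n ≤ (row.length : Int) := by simpa using hrow
    have hrest : ∀ r ∈ rest, x + n ≤ (r.toList.length : Int) :=
      fun r hr => hrows r (List.mem_cons_of_mem _ hr)
    have e1 : x.toNat - (x - n).toNat = n.toNat := by omega
    have e2 : x.toNat = (x - n).toNat + n.toNat := by omega
    have e3 : (x + n).toNat - x.toNat = n.toNat := by omega
    have hsliceL : PySem.List.slice row.toList (some (x - n)) (some x)
        = (row.toList.drop (x - n).toNat).take n.toNat := by
      rw [PySem.List.slice_toNat _ hxn (by omega), e1]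
    have hsliceR : PySem.List.slice row.toList (some x) (some (x + n))
        = (row.toList.drop ((x - n).toNat + n.toNat)).take n.toNat := by
      rw [PySem.List.slice_toNat _ (by omega) (by omega), e3, e2]
    have hwin : (x - n).toNat + n.toNat + n.toNat ≤ row.toList.length := by omega
    simp only [List.map_cons, List.flatten_cons]
    rw [hsliceL, hsliceR,
        pvHam_append _ _ _ _ (by simp [List.length_take, List.length_drop]; omega),
        pvRow row.toList (x - n).toNat n.toNat hwin, ih hrest]
    have e4 : (((x - n).toNat + n.toNat : Nat) : Int) = x := by omega
    rw [e4]
    simp [pvRowsCnt]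

-- ===== VERDICT (by name: the statement is the Claim_ definition above) =====
theorem horizontal_reflection_value_spec : Claim_equal_horizontal_reflection_value := by
  intro pattern x req _ hpre
  rw [pvPre_iff] at hpre
  obtain ⟨hne, hrows⟩ := hpre
  obtain ⟨row0, rest, rfl⟩ := List.exists_cons_of_ne_nil hne
  unfold Spec_horizontal_reflection_value horizontal_reflection_value horizontal_reflection_value_alt
  simp only [PySem.List.pyGet?_zero_cons, Option.getD_some, List.headD_cons] at *
  have hw0 : (0 : Int) ≤ PySem.Str.len row0 := by simp [PySem.Str.len_eq]
  by_cases hn : min x (PySem.Str.len row0 - x) ≤ 0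
  · -- no overlapping columns: A's loops run zero times, B's right string is empty
    have hz : (min x (PySem.Str.len row0 - x)).toNat = 0 := by omega
    have hcnt : pvRowsCnt x 0 (row0 :: rest) = 0 := by
      simp [pvRowsCnt, pvCnt]
    have hright : ∀ row ∈ (row0 :: rest),
        PySem.List.slice row.toList (some x) (some (x + min x (PySem.Str.len row0 - x))) = ([] : List Char) := by
      intro row _
      apply pvSliceEmpty _ _ _ (by omega)
      rcases lt_trichotomy x 0 with h | h | h
      · right; left; exact h
      · right; right; omega
      · left; omega
    have hflat : ((row0 :: rest).map
        (fun row => PySem.List.slice row.toList (some x) (some (x + min x (PySem.Str.len row0 - x))))).flatten = ([] : List Char) := by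
      rw [List.flatten_eq_nil_iff]
      intro l hl
      obtain ⟨row, hrow, rfl⟩ := List.mem_map.mp hl
      exact hright row hrow
    rw [hflat, pvARows_eq, hz, hcnt]
    simp
  · -- overlapping columns: the joined Hamming count equals A's pointer count
    push_neg at hn
    have hxn : 0 ≤ x - min x (PySem.Str.len row0 - x) := by omega
    have hlenrows : ∀ row ∈ (row0 :: rest),
        x + min x (PySem.Str.len row0 - x) ≤ (row.toList.length : Int) := by
      intro row hr
      rcases hrows row hr with h | h
      · omega
      · simpa [PySem.Str.len_eq] using h
    rw [pvARows_eq, zero_add,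
        pvFoldlAdd (fun p : Char × Char => if p.1 ≠ p.2 then (1 : Int) else 0)]
    rw [show ((((row0 :: rest).map (fun row => (PySem.List.slice row.toList (some (x - min x (PySem.Str.len row0 - x))) (some x)).reverse)).flatten.zip
        ((row0 :: rest).map (fun row => PySem.List.slice row.toList (some x) (some (x + min x (PySem.Str.len row0 - x))))).flatten).map
        (fun p : Char × Char => if p.1 ≠ p.2 then (1 : Int) else 0)).sum
        = pvHam ((row0 :: rest).map (fun row => (PySem.List.slice row.toList (some (x - min x (PySem.Str.len row0 - x))) (some x)).reverse)).flatten
                ((row0 :: rest).map (fun row => PySem.List.slice row.toList (some x) (some (x + min x (PySem.Str.len row0 - x))))).flatten from rfl]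
    rw [pvJoin _ _ hn hxn _ hlenrows, zero_add]
    have hS := pvRowsCnt_nonneg x (min x (PySem.Str.len row0 - x)).toNat (row0 :: rest)
    by_cases hC : pvRowsCnt x (min x (PySem.Str.len row0 - x)).toNat (row0 :: rest) > req ∧
        0 < pvRowsCnt x (min x (PySem.Str.len row0 - x)).toNat (row0 :: rest)
    · rw [if_pos hC, if_neg (by omega)]
    · rw [if_neg hC]
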